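-- pv_equiv track=rewrite | github.com/PatriciaDelCastillo/Estadistica-de-Pacientes-con-COVID-19-Coronavirus | practico_dos.py | comprobar_si_hay_arroba_texto
-- ===== SOURCE A (Python) =====
-- def comprobar_si_hay_arroba_texto(texto, cont_letra, banderaA, cont_arroba):
--     for usuario in texto:
--         cont_letra += 1
--         if cont_letra > 3:
--             if usuario == '@':
--                 cont_arroba += 1
--                 if cont_arroba == 1:
--                     banderaA = False
--                 else:
--                     banderaA = True
--     return banderaA
-- ===== SOURCE B (Python) =====
-- def comprobar_si_hay_arroba_texto(texto, cont_letra, banderaA, cont_arroba):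
--     # Characters contribute only once cont_letra has exceeded 3, i.e. from
--     # index max(0, 3 - cont_letra) on.  Count '@' there and decide directly.
--     start = max(0, 3 - cont_letra)
--     c = texto[start:].count('@')
--     if c == 0:
--         return banderaA
--     return cont_arroba + c != 1
-- ===== Notes on version B (the rewrite author's own statement) =====
-- stated objective: simpler
-- what changed: Replaces the per-character loop with mutable flag/counter state by a closed-form start offset, one count of '@' in the slice, and a direct boolean decision.
import Mathlib
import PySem

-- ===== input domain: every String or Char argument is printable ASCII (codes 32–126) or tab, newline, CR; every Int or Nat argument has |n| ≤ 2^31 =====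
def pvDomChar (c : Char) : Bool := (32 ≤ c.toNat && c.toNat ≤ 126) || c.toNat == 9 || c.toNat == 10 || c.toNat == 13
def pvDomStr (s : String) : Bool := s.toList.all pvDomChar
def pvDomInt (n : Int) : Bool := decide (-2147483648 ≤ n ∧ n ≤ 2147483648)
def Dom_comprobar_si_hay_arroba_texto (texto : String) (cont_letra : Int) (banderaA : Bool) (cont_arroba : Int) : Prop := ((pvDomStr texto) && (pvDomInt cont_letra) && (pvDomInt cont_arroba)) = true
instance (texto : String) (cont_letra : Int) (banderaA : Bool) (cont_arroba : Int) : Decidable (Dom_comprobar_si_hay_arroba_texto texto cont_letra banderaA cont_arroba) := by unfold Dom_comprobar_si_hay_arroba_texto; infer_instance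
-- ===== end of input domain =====

-- B replaces A's per-character flag/counter loop by a closed-form start offset,
-- one count of '@' in the slice from that offset, and a direct boolean decision (objective: simpler).


-- ===== PORT A =====
-- A's for-loop over the characters, carrying (cont_letra, banderaA, cont_arroba)
def pvLoopA : List Char → Int → Bool → Int → Bool
  | [], _, banderaA, _ => banderaA
  | usuario :: rest, cont_letra, banderaA, cont_arroba =>
    let cont_letra := cont_letra + 1
    if cont_letra > 3 then
      if usuario == '@' then
        let cont_arroba := cont_arroba + 1
        if cont_arroba == 1 then
          pvLoopA rest cont_letra false cont_arroba
        else
          pvLoopA rest cont_letra true cont_arroba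
      else
        pvLoopA rest cont_letra banderaA cont_arroba
    else
      pvLoopA rest cont_letra banderaA cont_arroba

def comprobar_si_hay_arroba_texto (texto : String) (cont_letra : Int) (banderaA : Bool) (cont_arroba : Int) : Bool :=
  pvLoopA texto.toList cont_letra banderaA cont_arroba

-- ===== PORT B =====
def comprobar_si_hay_arroba_texto_alt (texto : String) (cont_letra : Int) (banderaA : Bool) (cont_arroba : Int) : Bool :=
  let start : Int := max 0 (3 - cont_letra)
  let c : Nat := (PySem.List.slice texto.toList (some start) none).count '@'
  if c = 0 then banderaA
  else decide (cont_arroba + (c : Int) ≠ 1)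

-- ===== PRECONDITION & SPEC =====
def Spec_comprobar_si_hay_arroba_texto (texto : String) (cont_letra : Int) (banderaA : Bool) (cont_arroba : Int) (out : Bool) : Prop := out = comprobar_si_hay_arroba_texto_alt texto cont_letra banderaA cont_arroba
instance (texto : String) (cont_letra : Int) (banderaA : Bool) (cont_arroba : Int) (out : Bool) : Decidable (Spec_comprobar_si_hay_arroba_texto texto cont_letra banderaA cont_arroba out) := by unfold Spec_comprobar_si_hay_arroba_texto; infer_instance

-- ===== CLAIM (what is proved, stated in full; the proofs are below) =====
def Claim_equal_comprobar_si_hay_arroba_texto : Prop := ∀ (texto : String) (cont_letra : Int) (banderaA : Bool) (cont_arroba : Int), Dom_comprobar_si_hay_arroba_texto texto cont_letra banderaA cont_arroba → Spec_comprobar_si_hay_arroba_texto texto cont_letra banderaA cont_arroba (comprobar_si_hay_arroba_texto texto cont_letra banderaA cont_arroba)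

-- ===== LEMMAS AND PROOFS =====
-- Characterisation of A's loop: it returns banderaA when no '@' occurs from offset
-- max 0 (3 - cont_letra) on, and otherwise decides from the final counter value.
theorem pvLoopA_eq (l : List Char) : ∀ (cl : Int) (b : Bool) (ca : Int),
    pvLoopA l cl b ca =
      (if (l.drop (max 0 (3 - cl)).toNat).count '@' = 0 then b
       else decide (ca + ((l.drop (max 0 (3 - cl)).toNat).count '@' : Int) ≠ 1)) := by
  induction l with
  | nil => intro cl b ca; simp [pvLoopA]
  | cons x rest ih =>
    intro cl b ca
    by_cases h3 : cl + 1 > 3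
    · have hs : (max 0 (3 - cl)).toNat = 0 := by omega
      have hs' : (max 0 (3 - (cl + 1))).toNat = 0 := by omega
      by_cases hx : x = '@'
      · simp only [pvLoopA, if_pos h3, hx, beq_self_eq_true, if_true]
        have key : ∀ b0 : Bool, pvLoopA rest (cl + 1) b0 (ca + 1) =
            (if rest.count '@' = 0 then b0
             else decide (ca + 1 + (rest.count '@' : Int) ≠ 1)) := by
          intro b0; rw [ih, hs']; simp
        rw [hs]
        simp only [List.drop_zero, List.count_cons, beq_self_eq_true, if_true]
        by_cases hm : rest.count '@' = 0
        · have h1 : ¬ (rest.count '@' + 1 = 0) := by omega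
          by_cases hca : ca + 1 = 1
          · rw [if_pos (by simpa using hca), key, if_pos hm]
            simp only [h1, if_false]
            symm; rw [decide_eq_false_iff_not]; push_cast; omega
          · rw [if_neg (by simpa using hca), key, if_pos hm]
            simp only [h1, if_false]
            symm; rw [decide_eq_true_iff]; push_cast; omega
        · have h1 : ¬ (rest.count '@' + 1 = 0) := by omega
          have heq : (decide (ca + 1 + (rest.count '@' : Int) ≠ 1)) =
              (decide (ca + ((rest.count '@' + 1 : Nat) : Int) ≠ 1)) := by
            rw [decide_eq_decide]; push_cast; omega
          by_cases hca : ca + 1 = 1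
          · rw [if_pos (by simpa using hca), key, if_neg hm, heq]
            simp
          · rw [if_neg (by simpa using hca), key, if_neg hm, heq]
            simp
      · have hbx : (x == '@') = false := by simp [hx]
        simp only [pvLoopA, if_pos h3, hbx, if_false, Bool.false_eq_true]
        rw [ih, hs, hs']
        simp [List.count_cons, hbx]
    · -- cl + 1 ≤ 3 : this character is skipped; the offset shrinks by one
      have hst : (max 0 (3 - cl)).toNat = (max 0 (3 - (cl + 1))).toNat + 1 := by omega
      simp only [pvLoopA, if_neg h3]
      rw [ih, hst, List.drop_succ_cons]

theorem comprobar_si_hay_arroba_texto_spec : Claim_equal_comprobar_si_hay_arroba_texto := by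
  intro texto cl b ca _
  unfold Spec_comprobar_si_hay_arroba_texto comprobar_si_hay_arroba_texto comprobar_si_hay_arroba_texto_alt
  dsimp only
  rw [pvLoopA_eq, PySem.List.slice_from]
  omega
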